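-- pv_equiv track=rewrite | github.com/Gen1us02/PPOIS | Set/utils.py | sort_set
-- ===== SOURCE A (Python) =====
-- def sort_set(string: str) -> str:
--     """Функция рекурсивно сортирует вложенные множества и сами элементы множества
--
--     Аргументы:
--         string (str): Строковое представление множества
--
--     Возвращаемое значение:
--         str: Отсортированая строка, готовая к дальнейшим операциям
--     """
--     string = string.strip().replace(" ", "").replace("\n", "")
--
--     if not string.startswith('{') or not string.endswith('}'):
--         return string
--
--     s = string[1:-1]
--     if not s:
--         return "{}"
--
--     elements = []
--     current = ""
--     brackets_count = 0
--
--     for char in s: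
--         if char == '{':
--             brackets_count += 1
--         elif char == '}':
--             brackets_count -= 1
--
--         if char == ',' and brackets_count == 0:
--             if current:
--                 elements.append(current)
--                 current = ""
--         else:
--             current += char
--
--     if current:
--         elements.append(current)
--
--     sorted_elements = [sort_set(elem) for elem in elements]
--     sorted_elements = [elem for elem in sorted_elements if elem]
--     sorted_elements.sort()
--
--     return '{' + ','.join(sorted_elements) + '}'
-- ===== SOURCE B (Python) =====
-- # B: two-phase re-implementation — parse the normalized string once into a tree
-- # (leaves = non-{...} strings kept verbatim), then render the tree with
-- # per-level lexicographic sorting. Same observable behaviour as A.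
--
-- def _split_top(body):
--     """Split body at commas that sit at brace depth 0, skipping empty pieces."""
--     parts = []
--     current = ""
--     depth = 0
--     for ch in body:
--         if ch == '{':
--             depth += 1
--         elif ch == '}':
--             depth -= 1
--         if ch == ',' and depth == 0:
--             if current:
--                 parts.append(current)
--                 current = ""
--         else:
--             current += ch
--     if current:
--         parts.append(current)
--     return parts
--
--
-- def _parse(s):
--     """Strip the piece; a {...}-delimited piece becomes a list of parsed
--     children, anything else stays a raw leaf string."""
--     s = s.strip()
--     if s.startswith('{') and s.endswith('}'):
--         return [_parse(e) for e in _split_top(s[1:-1])]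
--     return s
--
--
-- def _render(node):
--     if isinstance(node, str):
--         return node
--     rendered = [r for r in (_render(c) for c in node) if r]
--     rendered.sort()
--     return '{' + ','.join(rendered) + '}'
--
--
-- def sort_set(string: str) -> str:
--     string = string.strip().replace(" ", "").replace("\n", "")
--     return _render(_parse(string))
-- ===== Notes on version B (the rewrite author's own statement) =====
-- stated objective: alternative
-- what changed: A sorts by re-normalizing and re-scanning each element string at every recursion level; B parses the normalized string once into an explicit tree (raw-string leaves, node child lists) and then renders the tree, sorting the rendered children per level.
import Mathlib
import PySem

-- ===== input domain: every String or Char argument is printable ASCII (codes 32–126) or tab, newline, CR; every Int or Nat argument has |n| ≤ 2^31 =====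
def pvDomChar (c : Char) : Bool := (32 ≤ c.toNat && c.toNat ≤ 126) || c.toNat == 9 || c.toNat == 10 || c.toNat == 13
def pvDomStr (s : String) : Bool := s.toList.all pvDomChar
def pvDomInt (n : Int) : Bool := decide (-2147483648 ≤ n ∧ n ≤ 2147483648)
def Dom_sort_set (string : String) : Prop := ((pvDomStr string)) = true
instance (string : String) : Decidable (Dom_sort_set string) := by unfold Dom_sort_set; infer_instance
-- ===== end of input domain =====

-- B re-implements A as parse-once-to-a-tree plus a sorting renderer (alternative decomposition);
-- the proved claim: both return the same string on every input.

-- ===== PORT A =====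
-- A is recursive on strings; the port recurses on code-point lists with a fuel
-- argument bounded by the input length (fuel never runs out: recursive calls are
-- on strictly shorter strings).
-- A's element-splitting loop (the for-loop over s with elements/current/brackets_count,
-- plus the trailing 'if current' append), as a fold
def sortSetSplit (s : List Char) : List (List Char) :=
  let st := s.foldl (fun (acc : List (List Char) × List Char × Int) ch =>
      let bc := if ch = '{' then acc.2.2 + 1 else if ch = '}' then acc.2.2 - 1 else acc.2.2
      if ch = ',' ∧ bc = 0 then
        (if acc.2.1 ≠ [] then (acc.1 ++ [acc.2.1], ([], bc)) else (acc.1, (acc.2.1, bc)))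
      else (acc.1, (acc.2.1 ++ [ch], bc))) (([] : List (List Char)), (([] : List Char), (0 : Int)))
  if st.2.1 ≠ [] then st.1 ++ [st.2.1] else st.1

def sortSetCore : Nat → List Char → List Char
  | 0, s => s
  | f+1, s =>
    let t := PySem.Chars.replace (PySem.Chars.replace (PySem.Chars.strip s) [' '] []) ['\n'] []
    if (!PySem.Chars.startswith t ['{']) || (!PySem.Chars.endswith t ['}']) then t
    else
      let b := PySem.List.slice t (some 1) (some (-1))
      if b = [] then ['{', '}']
      else
        let elements := sortSetSplit b
        let sortedElements := elements.map (fun e => sortSetCore f e)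
        let sortedElements2 := sortedElements.filter (fun e => decide (e ≠ []))
        let sortedElements3 := PySem.List.sorted sortedElements2 id false
        ['{'] ++ PySem.Chars.join [','] sortedElements3 ++ ['}']

def sort_set (string : String) : String :=
  String.ofList (sortSetCore (string.toList.length + 1) string.toList)

-- ===== PORT B =====
-- Source B's tree: a leaf keeps a raw string, a node keeps the parsed children.
mutual
inductive PTree where
  | leaf : List Char → PTree
  | node : PTreeList → PTree
inductive PTreeList where
  | nil : PTreeList
  | cons : PTree → PTreeList → PTreeList
end

def toTL : List PTree → PTreeList
  | [] => .nil
  | t :: ts => .cons t (toTL ts)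

-- Source B _split_top
def splitTopB (body : List Char) : List (List Char) :=
  let st := body.foldl (fun (acc : List (List Char) × List Char × Int) ch =>
      let bc := if ch = '{' then acc.2.2 + 1 else if ch = '}' then acc.2.2 - 1 else acc.2.2
      if ch = ',' ∧ bc = 0 then
        (if acc.2.1 ≠ [] then (acc.1 ++ [acc.2.1], ([], bc)) else (acc.1, (acc.2.1, bc)))
      else (acc.1, (acc.2.1 ++ [ch], bc))) (([] : List (List Char)), (([] : List Char), (0 : Int)))
  if st.2.1 ≠ [] then st.1 ++ [st.2.1] else st.1

-- Source B _parse (fuel bounded by the input length, like A's port)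
def parseB : Nat → List Char → PTree
  | 0, s => .leaf s
  | f+1, s0 =>
    let s := PySem.Chars.strip s0
    if PySem.Chars.startswith s ['{'] && PySem.Chars.endswith s ['}'] then
      .node (toTL ((splitTopB (PySem.List.slice s (some 1) (some (-1)))).map (fun e => parseB f e)))
    else .leaf s

-- Source B _render
mutual
def renderB : PTree → List Char
  | .leaf s => s
  | .node ts =>
    let rendered := (renderListB ts).filter (fun r => decide (r ≠ []))
    let rendered2 := PySem.List.sorted rendered id false
    ['{'] ++ PySem.Chars.join [','] rendered2 ++ ['}']
def renderListB : PTreeList → List (List Char)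
  | .nil => []
  | .cons t ts => renderB t :: renderListB ts
end

def sort_set_alt (string : String) : String :=
  let t := PySem.Str.replace (PySem.Str.replace (PySem.Str.strip string) " " "") "\n" ""
  String.ofList (renderB (parseB (string.toList.length + 1) t.toList))

-- ===== PRECONDITION & SPEC =====
def Spec_sort_set (string : String) (out : String) : Prop := out = sort_set_alt string
instance (string : String) (out : String) : Decidable (Spec_sort_set string out) := by unfold Spec_sort_set; infer_instance

-- ===== CLAIM (what is proved, stated in full; the proofs are below) =====
def Claim_equal_sort_set : Prop := ∀ (string : String), Dom_sort_set string → Spec_sort_set string (sort_set string)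

-- ===== LEMMAS AND PROOFS =====

-- A's top-level normalisation, on code-point lists
def normChars (s : List Char) : List Char :=
  PySem.Chars.replace (PySem.Chars.replace (PySem.Chars.strip s) [' '] []) ['\n'] []

-- "no space, no newline" — true of every string A recurses on below the top level
def nws (s : List Char) : Prop := (' ' ∉ s) ∧ ('\n' ∉ s)

lemma go_filter (c : Char) : ∀ (fuel : Nat) (l acc : List Char), l.length ≤ fuel →
    PySem.Chars.replace.go [c] [] fuel l acc = acc.reverse ++ l.filter (fun x => decide (x ≠ c)) := by
  intro fuel
  induction fuel with
  | zero => intro l acc h; simp at h; subst h; simp [PySem.Chars.replace.go]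
  | succ f ih =>
    intro l acc h
    cases l with
    | nil => simp [PySem.Chars.replace.go]
    | cons x t =>
      simp only [PySem.Chars.replace.go, List.isPrefixOf, List.filter]
      by_cases hx : c = x
      · subst hx
        rw [if_pos (by simp)]
        simp [ih t acc (by simpa using h)]
      · rw [if_neg (by simp [hx])]
        simp [ih t (x :: acc) (by simpa using h), Ne.symm hx]

lemma replace_single_nil (s : List Char) (c : Char) :
    PySem.Chars.replace s [c] [] = s.filter (fun x => decide (x ≠ c)) := by
  rw [PySem.Chars.replace]
  simp only [List.isEmpty_cons]
  rw [if_neg (by simp), go_filter c s.length s [] le_rfl]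
  simp

lemma normChars_eq_filter (s : List Char) :
    normChars s = ((PySem.Chars.strip s).filter (fun x => decide (x ≠ ' '))).filter (fun x => decide (x ≠ '\n')) := by
  rw [normChars, replace_single_nil, replace_single_nil]

lemma strip_sublist (s : List Char) : List.Sublist (PySem.Chars.strip s) s := by
  unfold PySem.Chars.strip PySem.Chars.rstrip PySem.Chars.lstrip
  have h1 : List.Sublist (List.dropWhile PySem.Chars.isspace s) s := List.dropWhile_sublist _
  have h2 := (List.dropWhile_sublist (l := (List.dropWhile PySem.Chars.isspace s).reverse)
      (p := PySem.Chars.isspace)).reverse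
  simp only [List.reverse_reverse] at h2
  exact h2.trans h1

lemma nws_normChars_eq_strip {s : List Char} (h : nws s) : normChars s = PySem.Chars.strip s := by
  rw [normChars_eq_filter]
  have h1 : ' ' ∉ PySem.Chars.strip s := fun hm => h.1 ((strip_sublist s).mem hm)
  have h2 : '\n' ∉ PySem.Chars.strip s := fun hm => h.2 ((strip_sublist s).mem hm)
  rw [List.filter_eq_self.2 (fun c hc => by
        simp only [decide_eq_true_eq]; rintro rfl; exact h2 (List.mem_of_mem_filter hc)),
      List.filter_eq_self.2 (fun c hc => by
        simp only [decide_eq_true_eq]; rintro rfl; exact h1 hc)]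

lemma nws_normChars (s : List Char) : nws (normChars s) := by
  rw [normChars_eq_filter]
  constructor
  · intro hm
    have := List.mem_filter.1 (List.mem_filter.1 hm).1
    simp at this
  · intro hm
    have := List.mem_filter.1 hm
    simp at this

lemma dropWhile_filter_eq_self {s : List Char} (p : Char → Bool)
    (hp : ∀ c, p c = false → PySem.Chars.isspace c = true)
    (h : List.dropWhile PySem.Chars.isspace s = s) :
    List.dropWhile PySem.Chars.isspace (s.filter p) = s.filter p := by
  cases s with
  | nil => simp
  | cons x t =>
    have hx : PySem.Chars.isspace x = false := by
      by_contra hb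
      have hxs : PySem.Chars.isspace x = true := by simpa using hb
      rw [List.dropWhile_cons, hxs] at h
      simp only [if_true] at h
      have hlen := (List.dropWhile_sublist (l := t) (p := PySem.Chars.isspace)).length_le
      rw [h] at hlen
      simp at hlen
    have hpx : p x = true := by
      by_contra hb
      have := hp x (by simpa using hb)
      rw [this] at hx; exact absurd hx (by simp)
    simp [hpx, hx]

lemma dw_fix_of_prefix {w v : List Char} (hp : w <+: v)
    (h : List.dropWhile PySem.Chars.isspace v = v) :
    List.dropWhile PySem.Chars.isspace w = w := by
  cases w with
  | nil => simp
  | cons x tw =>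
    obtain ⟨r, hr⟩ := hp
    cases v with
    | nil => simp at hr
    | cons y tv =>
      have hxy : x = y := by
        have := congrArg (fun l => l.headD ' ') hr
        simpa using this
      subst hxy
      have hx : PySem.Chars.isspace x = false := by
        by_contra hb
        have hxs : PySem.Chars.isspace x = true := by simpa using hb
        rw [List.dropWhile_cons, hxs] at h
        simp only [if_true] at h
        have hlen := (List.dropWhile_sublist (l := tv) (p := PySem.Chars.isspace)).length_le
        rw [h] at hlen
        simp at hlen
      simp [hx]

lemma strip_dw_fix (s : List Char) :
    List.dropWhile PySem.Chars.isspace (PySem.Chars.strip s) = PySem.Chars.strip s ∧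
    List.dropWhile PySem.Chars.isspace (PySem.Chars.strip s).reverse = (PySem.Chars.strip s).reverse := by
  constructor
  · have hpre : PySem.Chars.strip s <+: PySem.Chars.lstrip s := by
      unfold PySem.Chars.strip PySem.Chars.rstrip
      have := (List.dropWhile_suffix (l := (PySem.Chars.lstrip s).reverse) PySem.Chars.isspace).reverse
      simpa using this
    exact dw_fix_of_prefix hpre (List.dropWhile_idempotent _ _)
  · have hrev : (PySem.Chars.strip s).reverse
        = List.dropWhile PySem.Chars.isspace (PySem.Chars.lstrip s).reverse := by
      unfold PySem.Chars.strip PySem.Chars.rstrip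
      simp
    rw [hrev, List.dropWhile_idempotent]

lemma strip_normChars (s : List Char) : PySem.Chars.strip (normChars s) = normChars s := by
  have hfix := strip_dw_fix s
  rw [normChars_eq_filter]
  set u := PySem.Chars.strip s with hu
  have hp1 : ∀ c : Char, (fun x => decide (x ≠ ' ')) c = false → PySem.Chars.isspace c = true := by
    intro c hc; simp only [decide_eq_false_iff_not, not_not] at hc; subst hc; decide
  have hp2 : ∀ c : Char, (fun x => decide (x ≠ '\n')) c = false → PySem.Chars.isspace c = true := by
    intro c hc; simp only [decide_eq_false_iff_not, not_not] at hc; subst hc; decide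
  have hl1 := dropWhile_filter_eq_self _ hp1 hfix.1
  have hl2 := dropWhile_filter_eq_self _ hp2 hl1
  unfold PySem.Chars.strip PySem.Chars.lstrip PySem.Chars.rstrip
  rw [hl2]
  have key : List.dropWhile PySem.Chars.isspace
      (List.filter (fun x => decide (x ≠ '\n')) (List.filter (fun x => decide (x ≠ ' ')) u)).reverse
      = (List.filter (fun x => decide (x ≠ '\n')) (List.filter (fun x => decide (x ≠ ' ')) u)).reverse := by
    rw [← List.filter_reverse, ← List.filter_reverse]
    exact dropWhile_filter_eq_self _ hp2 (dropWhile_filter_eq_self _ hp1 hfix.2)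
  rw [key, List.reverse_reverse]

lemma normChars_idem (s : List Char) : normChars (normChars s) = normChars s := by
  rw [nws_normChars_eq_strip (nws_normChars s), strip_normChars]

lemma slice_one_neg_one (xs : List Char) :
    PySem.List.slice xs (some 1) (some (-1)) = xs.tail.dropLast := by
  simp only [PySem.List.slice, PySem.List.clampIdx]
  norm_num
  rcases xs with _ | ⟨x, t⟩
  · simp
  · rcases t with _ | ⟨y, u⟩
    · simp
    · simp only [List.length_cons]
      have hm : min 1 (u.length + 1 + 1) = 1 := by omega
      rw [hm, if_neg (List.cons_ne_nil _ _)]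
      have h3 : (((u.length + 1 + 1 : ℕ) : Int) + -1).toNat = u.length + 1 := by omega
      rw [h3]
      simp only [List.drop_one, List.tail_cons]
      rw [List.dropLast_eq_take]
      simp

lemma braced_shape {t : List Char} (h1 : PySem.Chars.startswith t ['{'] = true)
    (h2 : PySem.Chars.endswith t ['}'] = true) : ∃ mid, t = '{' :: mid ++ ['}'] := by
  rw [PySem.Chars.startswith_iff] at h1
  rw [PySem.Chars.endswith_iff] at h2
  obtain ⟨r, hr⟩ := h1
  obtain ⟨l, hl⟩ := h2
  cases t with
  | nil => simp at hr
  | cons x tt =>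
    have hx : x = '{' := by
      have := congrArg (fun l => l.headD ' ') hr
      simpa using this.symm
    subst hx
    cases tt using List.reverseRecOn with
    | nil =>
      have := congrArg (fun q => List.getLast? q) hl
      simp at this
    | append_singleton mid c =>
      have hc : c = '}' := by
        have h1 : (l ++ ['}']).getLast? = some '}' := List.getLast?_concat
        have h2 : ('{' :: (mid ++ [c])).getLast? = some c := by
          rw [show ('{' :: (mid ++ [c])) = (('{' :: mid) ++ [c]) from rfl]
          exact List.getLast?_concat
        rw [hl, h2] at h1
        injection h1
      subst hc
      exact ⟨mid, by simp⟩

def stepF (acc : List (List Char) × List Char × Int) (ch : Char) :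
    List (List Char) × List Char × Int :=
  if ch = ',' ∧ (if ch = '{' then acc.2.2 + 1 else if ch = '}' then acc.2.2 - 1 else acc.2.2) = 0 then
    (if acc.2.1 ≠ [] then
      (acc.1 ++ [acc.2.1], ([], if ch = '{' then acc.2.2 + 1 else if ch = '}' then acc.2.2 - 1 else acc.2.2))
     else (acc.1, (acc.2.1, if ch = '{' then acc.2.2 + 1 else if ch = '}' then acc.2.2 - 1 else acc.2.2)))
  else (acc.1, (acc.2.1 ++ [ch], if ch = '{' then acc.2.2 + 1 else if ch = '}' then acc.2.2 - 1 else acc.2.2))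

lemma splitTopB_eq (body : List Char) :
    splitTopB body =
      (let st := body.foldl stepF ([], ([], 0));
       if st.2.1 ≠ [] then st.1 ++ [st.2.1] else st.1) := rfl

lemma split_inv : ∀ (rest : List Char) (els : List (List Char)) (cur : List Char) (d : Int)
    (e : List Char),
    e ∈ (let st := rest.foldl stepF (els, (cur, d));
          if st.2.1 ≠ [] then st.1 ++ [st.2.1] else st.1) →
    e ∈ els ∨ (e ≠ [] ∧ e.length ≤ cur.length + rest.length ∧ ∀ c ∈ e, c ∈ cur ∨ c ∈ rest) := by
  intro rest
  induction rest with
  | nil =>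
    intro els cur d e h
    simp only [List.foldl_nil] at h
    by_cases hc : cur = []
    · subst hc
      simp at h
      exact Or.inl h
    · rw [if_pos (by simpa using hc)] at h
      rcases List.mem_append.1 h with h' | h'
      · exact Or.inl h'
      · right
        simp at h'
        subst h'
        exact ⟨hc, by simp, fun c hcc => Or.inl hcc⟩
  | cons ch rest ih =>
    intro els cur d e h
    rw [List.foldl_cons] at h
    by_cases hcomma : ch = ',' ∧ (if ch = '{' then d + 1 else if ch = '}' then d - 1 else d) = 0
    · by_cases hcur : cur = []
      · have hstep : stepF (els, (cur, d)) ch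
            = (els, (cur, if ch = '{' then d + 1 else if ch = '}' then d - 1 else d)) := by
          rw [stepF, if_pos hcomma, if_neg (by simpa using hcur)]
        rw [hstep] at h
        subst hcur
        rcases ih els [] _ e h with h' | ⟨hne, hlen, hsub⟩
        · exact Or.inl h'
        · right
          refine ⟨hne, by simp at hlen ⊢; omega, fun c hcc => ?_⟩
          rcases hsub c hcc with h'' | h''
          · simp at h''
          · exact Or.inr (List.mem_cons_of_mem _ h'')
      · have hstep : stepF (els, (cur, d)) ch
            = (els ++ [cur], ([], if ch = '{' then d + 1 else if ch = '}' then d - 1 else d)) := by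
          rw [stepF, if_pos hcomma, if_pos (by simpa using hcur)]
        rw [hstep] at h
        rcases ih (els ++ [cur]) [] _ e h with h' | ⟨hne, hlen, hsub⟩
        · rcases List.mem_append.1 h' with h'' | h''
          · exact Or.inl h''
          · right
            simp at h''
            subst h''
            exact ⟨hcur, by simp, fun c hcc => Or.inl hcc⟩
        · right
          refine ⟨hne, by simp at hlen ⊢; omega, fun c hcc => ?_⟩
          rcases hsub c hcc with h'' | h''
          · simp at h''
          · exact Or.inr (List.mem_cons_of_mem _ h'')
    · have hstep : stepF (els, (cur, d)) ch
          = (els, (cur ++ [ch], if ch = '{' then d + 1 else if ch = '}' then d - 1 else d)) := by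
        rw [stepF, if_neg hcomma]
      rw [hstep] at h
      rcases ih els (cur ++ [ch]) _ e h with h' | ⟨hne, hlen, hsub⟩
      · exact Or.inl h'
      · right
        refine ⟨hne, by simp at hlen ⊢; omega, fun c hcc => ?_⟩
        rcases hsub c hcc with h'' | h''
        · rcases List.mem_append.1 h'' with h3 | h3
          · exact Or.inl h3
          · simp at h3
            subst h3
            exact Or.inr (List.mem_cons_self)
        · exact Or.inr (List.mem_cons_of_mem _ h'')

lemma mem_splitTopB {body e : List Char} (h : e ∈ splitTopB body) :
    e ≠ [] ∧ e.length ≤ body.length ∧ ∀ c ∈ e, c ∈ body := by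
  rw [splitTopB_eq] at h
  rcases split_inv body [] [] 0 e h with h' | ⟨hne, hlen, hsub⟩
  · simp at h'
  · refine ⟨hne, by simpa using hlen, fun c hcc => ?_⟩
    rcases hsub c hcc with h'' | h''
    · simp at h''
    · exact h''

lemma renderListB_toTL (l : List PTree) : renderListB (toTL l) = l.map renderB := by
  induction l with
  | nil => rfl
  | cons t ts ih => simp [toTL, renderListB, ih]

lemma sortSetSplit_eq : sortSetSplit = splitTopB := by
  funext b
  rfl

lemma normChars_length_le (s : List Char) : (normChars s).length ≤ s.length := by
  rw [normChars_eq_filter]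
  calc (((PySem.Chars.strip s).filter (fun x => decide (x ≠ ' '))).filter
          (fun x => decide (x ≠ '\n'))).length
      ≤ ((PySem.Chars.strip s).filter (fun x => decide (x ≠ ' '))).length :=
        List.length_filter_le _ _
    _ ≤ (PySem.Chars.strip s).length := List.length_filter_le _ _
    _ ≤ s.length := (strip_sublist s).length_le

lemma main_lemma : ∀ (f : Nat) (s : List Char), nws s → s.length < f →
    sortSetCore f s = renderB (parseB f s) := by
  intro f
  induction f with
  | zero => intro s _ h; omega
  | succ f ih =>
    intro s hnws hlen
    rw [sortSetCore, parseB]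
    simp only [show PySem.Chars.replace (PySem.Chars.replace (PySem.Chars.strip s) [' '] []) ['\n'] []
        = normChars s from rfl, nws_normChars_eq_strip hnws]
    set t := PySem.Chars.strip s with ht
    by_cases hsw : PySem.Chars.startswith t ['{'] = true
    · by_cases hew : PySem.Chars.endswith t ['}'] = true
      · simp only [hsw, hew, Bool.not_true, Bool.or_self, Bool.and_self, if_true]
        obtain ⟨mid, hmid⟩ := braced_shape hsw hew
        have hslice : PySem.List.slice t (some 1) (some (-1)) = mid := by
          rw [slice_one_neg_one, hmid]
          simp
        rw [hslice]
        by_cases hb : mid = []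
        · subst hb
          rw [if_pos rfl]
          rfl
        · rw [if_neg hb, sortSetSplit_eq]
          simp only [renderB, renderListB_toTL, List.map_map]
          have hmap : (splitTopB mid).map (fun e => sortSetCore f e)
              = (splitTopB mid).map (renderB ∘ fun e => parseB f e) := by
            apply List.map_congr_left
            intro e he
            obtain ⟨hne, hel, hsub⟩ := mem_splitTopB he
            have hmem : ∀ c ∈ e, c ∈ s := by
              intro c hc
              apply (strip_sublist s).mem
              rw [← ht]
              rw [hmid]
              have : c ∈ mid := hsub c hc
              simp [this]
            have hnwse : nws e := by
              constructor
              · intro hm; exact hnws.1 (hmem _ hm)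
              · intro hm; exact hnws.2 (hmem _ hm)
            have htlen : t.length ≤ s.length := (strip_sublist s).length_le
            have htm : t.length = mid.length + 2 := by rw [hmid]; simp
            exact ih e hnwse (by omega)
          rw [hmap]
          simp
      · have hew' : PySem.Chars.endswith t ['}'] = false := by simpa using hew
        simp only [hsw, hew', Bool.not_true, Bool.not_false, Bool.or_true, if_true,
          Bool.and_false]
        rfl
    · have hsw' : PySem.Chars.startswith t ['{'] = false := by simpa using hsw
      simp only [hsw', Bool.not_false, Bool.true_or, if_true, Bool.false_and]
      rfl

-- ===== VERDICT (by name: the statement is the Claim_ definition above) =====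
theorem sort_set_spec : Claim_equal_sort_set := by
  intro s _
  show sort_set s = sort_set_alt s
  have h1 : sort_set_alt s = String.ofList (renderB (parseB (s.toList.length + 1)
      (PySem.Str.replace (PySem.Str.replace (PySem.Str.strip s) " " "") "\n" "").toList)) := rfl
  have htl : (PySem.Str.replace (PySem.Str.replace (PySem.Str.strip s) " " "") "\n" "").toList
      = normChars s.toList := by
    simp [normChars]
  rw [h1, htl]
  have hstep : sortSetCore (s.toList.length + 1) s.toList
      = sortSetCore (s.toList.length + 1) (normChars s.toList) := by
    rw [sortSetCore, sortSetCore]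
    simp only [show ∀ u : List Char, PySem.Chars.replace (PySem.Chars.replace (PySem.Chars.strip u) [' '] []) ['\n'] []
        = normChars u from fun _ => rfl, normChars_idem]
  show String.ofList (sortSetCore (s.toList.length + 1) s.toList) = _
  rw [hstep, main_lemma _ _ (nws_normChars _) (by have := normChars_length_le s.toList; omega)]
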